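-- pv_equiv track=rewrite | github.com/zuuky/jetbrains_plugin | sweep_autocomplete_servers/autocomplete/next_edit_autocomplete_utils.py | split_into_hunks
-- ===== SOURCE A (Python) =====
-- def split_into_hunks(diff: str) -> list[str]:
--     """Split a diff string into individual hunks.
--
--     Args:
--         diff: The full diff string
--
--     Returns:
--         List of individual diff hunks, each starting with @@ marker
--     """
--     hunks = []
--     current_hunk = []
--
--     for line in diff.splitlines():
--         if line.startswith("File: ") and current_hunk:
--             hunks.append("\n".join(current_hunk))
--             current_hunk = []
--         current_hunk.append(line)
--
--     if current_hunk:
--         hunks.append("\n".join(current_hunk))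
--
--     return hunks
-- ===== SOURCE B (Python) =====
-- def split_into_hunks(diff: str) -> list[str]:
--     """Split a diff string into hunks at "File: " boundary lines.
--
--     Two-pointer scan: for each hunk start i, advance j to the next
--     "File: " boundary (or the end) and emit the slice lines[i:j].
--     """
--     lines = diff.splitlines()
--     hunks = []
--     n = len(lines)
--     i = 0
--     while i < n:
--         j = i + 1
--         while j < n and not lines[j].startswith("File: "):
--             j += 1
--         hunks.append("\n".join(lines[i:j]))
--         i = j
--     return hunks
-- ===== Notes on version B (the rewrite author's own statement) =====
-- stated objective: alternative
-- what changed: Replaces A's single-pass flush-on-boundary accumulator (current_hunk list plus trailing flush) with a two-pointer scan that, for each hunk start i, advances j to the next 'File: ' boundary and emits the slice lines[i:j].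
import Mathlib
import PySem

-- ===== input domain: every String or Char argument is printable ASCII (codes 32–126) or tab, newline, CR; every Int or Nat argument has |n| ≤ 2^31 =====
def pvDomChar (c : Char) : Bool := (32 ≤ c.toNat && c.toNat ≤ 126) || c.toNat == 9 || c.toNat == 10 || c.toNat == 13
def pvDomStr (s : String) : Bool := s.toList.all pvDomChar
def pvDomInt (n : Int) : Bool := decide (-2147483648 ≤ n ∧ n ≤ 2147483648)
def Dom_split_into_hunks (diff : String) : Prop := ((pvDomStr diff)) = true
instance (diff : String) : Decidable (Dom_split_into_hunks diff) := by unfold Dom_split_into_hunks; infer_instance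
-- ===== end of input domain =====

-- B replaces A's flush-on-boundary accumulator by a two-pointer scan that finds each
-- hunk's extent and slices it out; objective: alternative decomposition (same cost).

-- ===== PORT A =====
-- one iteration of A's for-loop over (hunks, current_hunk)
def hunkStep (st : List String × List String) (line : String) : List String × List String :=
  if PySem.Str.startswith line "File: " && !st.2.isEmpty then
    (st.1 ++ [PySem.Str.join "\n" st.2], [line])
  else
    (st.1, st.2 ++ [line])

def split_into_hunks (diff : String) : List String :=
  let st := (PySem.Str.splitlines diff).foldl hunkStep ([], [])
  if !st.2.isEmpty then st.1 ++ [PySem.Str.join "\n" st.2] else st.1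

-- ===== PORT B =====
-- inner while: advance j to the next "File: " line (or to the end);
-- lines[j] is exact here since the loop guard gives j < lines.length.
def nextBoundary (lines : List String) (j : Nat) : Nat :=
  if h : j < lines.length then
    if PySem.Str.startswith ((PySem.List.pyGet? lines (j : Int)).getD "") "File: " then j
    else nextBoundary lines (j + 1)
  else j
termination_by lines.length - j

theorem nextBoundary_ge (lines : List String) (j : Nat) : j ≤ nextBoundary lines j := by
  fun_induction nextBoundary lines j with
  | case1 => omega
  | case2 _ _ _ ih => omega
  | case3 => omega

-- outer while: emit the slice lines[i:j] and continue from j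
def hunkLoop (lines : List String) (i : Nat) (hunks : List String) : List String :=
  if i < lines.length then
    let j := nextBoundary lines (i + 1)
    hunkLoop lines j
      (hunks ++ [PySem.Str.join "\n" (PySem.List.slice lines (some (i : Int)) (some (j : Int)))])
  else hunks
termination_by lines.length - i
decreasing_by have := nextBoundary_ge lines (i + 1); omega

def split_into_hunks_alt (diff : String) : List String :=
  hunkLoop (PySem.Str.splitlines diff) 0 []

-- ===== PRECONDITION & SPEC =====
def Spec_split_into_hunks (diff : String) (out : List String) : Prop := out = split_into_hunks_alt diff
instance (diff : String) (out : List String) : Decidable (Spec_split_into_hunks diff out) := by unfold Spec_split_into_hunks; infer_instance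

-- ===== CLAIM (what is proved, stated in full; the proofs are below) =====
def Claim_equal_split_into_hunks : Prop := ∀ (diff : String), Dom_split_into_hunks diff → Spec_split_into_hunks diff (split_into_hunks diff)

-- ===== LEMMAS AND PROOFS =====

-- "this line does not start a new hunk"
def pvQ (x : String) : Bool := !(PySem.Str.startswith x "File: ")

theorem pvQ_of_pos {l : String} (hp : PySem.Str.startswith l "File: " = true) :
    pvQ l = false := by
  unfold pvQ; rw [hp]; decide

theorem pvQ_of_neg {l : String} (hp : ¬ PySem.Str.startswith l "File: " = true) :
    pvQ l = true := by
  unfold pvQ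
  cases hx : PySem.Str.startswith l "File: " with
  | false => decide
  | true => exact absurd hx hp

-- reference grouping: first line plus following non-boundary lines, then recurse
def grp : List String → List (List String)
  | [] => []
  | l :: ls => (l :: ls.takeWhile pvQ) :: grp (ls.dropWhile pvQ)
termination_by L => L.length
decreasing_by simpa using Nat.lt_succ_of_le (List.length_dropWhile_le pvQ ls)

theorem take_takeWhile_len (q : String → Bool) (l : List String) :
    l.take ((l.takeWhile q).length) = l.takeWhile q := by
  induction l with
  | nil => simp
  | cons a t ih => by_cases h : q a <;> simp [List.takeWhile_cons, h, ih]

theorem drop_takeWhile_len (q : String → Bool) (l : List String) :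
    l.drop ((l.takeWhile q).length) = l.dropWhile q := by
  induction l with
  | nil => simp
  | cons a t ih => by_cases h : q a <;> simp [List.takeWhile_cons, List.dropWhile_cons, h, ih]

theorem nb_eq (lines : List String) (j : Nat) :
    nextBoundary lines j = j + ((lines.drop j).takeWhile pvQ).length := by
  fun_induction nextBoundary lines j with
  | case1 j h hs =>
      have hsome : (PySem.List.pyGet? lines (j : Int)).getD "" = lines[j] := by
        rw [PySem.List.pyGet?_natCast, List.getElem?_eq_getElem h, Option.getD_some]
      rw [hsome] at hs
      have hb : pvQ lines[j] = false := pvQ_of_pos hs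
      rw [List.drop_eq_getElem_cons h, List.takeWhile_cons, hb]
      simp
  | case2 j h hs ih =>
      have hsome : (PySem.List.pyGet? lines (j : Int)).getD "" = lines[j] := by
        rw [PySem.List.pyGet?_natCast, List.getElem?_eq_getElem h, Option.getD_some]
      rw [hsome] at hs
      have hb : pvQ lines[j] = true := pvQ_of_neg hs
      rw [List.drop_eq_getElem_cons h, List.takeWhile_cons, hb, ih]
      simp
      omega
  | case3 j h =>
      rw [List.drop_eq_nil_of_le (by omega)]
      simp
theorem hunkLoop_eq (lines : List String) (i : Nat) (hunks : List String) :
    hunkLoop lines i hunks = hunks ++ (grp (lines.drop i)).map (PySem.Str.join "\n") := by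
  fun_induction hunkLoop lines i hunks with
  | case1 i hunks h j ih =>
      have hj : j = (i + 1) + ((lines.drop (i + 1)).takeWhile pvQ).length := nb_eq lines (i + 1)
      rw [ih]
      have hdropi : lines.drop i = lines[i] :: lines.drop (i + 1) := List.drop_eq_getElem_cons h
      have hslice : PySem.List.slice lines (some (i : Int)) (some (j : Int))
          = lines[i] :: (lines.drop (i + 1)).takeWhile pvQ := by
        rw [PySem.List.slice_natCast, hdropi]
        have hlen : j - i = ((lines.drop (i + 1)).takeWhile pvQ).length + 1 := by omega
        rw [hlen, List.take_succ_cons, take_takeWhile_len]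
      have hdropj : lines.drop j = (lines.drop (i + 1)).dropWhile pvQ := by
        rw [← drop_takeWhile_len pvQ (lines.drop (i + 1)), List.drop_drop]
        congr 1
      rw [hslice, hdropj, hdropi]
      simp only [grp]
      simp
  | case2 i hunks h =>
      rw [List.drop_eq_nil_of_le (by omega)]
      simp [grp]

-- A's loop, run from a nonempty current hunk, then finalized
theorem foldl_hunkStep (L : List String) :
    ∀ (hunks cur : List String), cur ≠ [] →
    (let st := L.foldl hunkStep (hunks, cur)
     if !st.2.isEmpty then st.1 ++ [PySem.Str.join "\n" st.2] else st.1)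
      = hunks ++ (((cur ++ L.takeWhile pvQ) :: grp (L.dropWhile pvQ)).map (PySem.Str.join "\n")) := by
  induction L with
  | nil =>
      intro hunks cur hc
      simp [grp, hc]
  | cons l L' ih =>
      intro hunks cur hc
      by_cases hp : PySem.Str.startswith l "File: "
      · have hb : pvQ l = false := pvQ_of_pos hp
        have hstep : hunkStep (hunks, cur) l = (hunks ++ [PySem.Str.join "\n" cur], [l]) := by
          simp only [hunkStep]
          rw [hp]
          simp [hc]
        simp only [List.foldl_cons, hstep]
        rw [ih (hunks ++ [PySem.Str.join "\n" cur]) [l] (by simp)]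
        rw [List.takeWhile_cons, List.dropWhile_cons, hb]
        simp [grp]
      · have hb : pvQ l = true := pvQ_of_neg hp
        have hsw : PySem.Str.startswith l "File: " = false := by
          cases hx : PySem.Str.startswith l "File: " with
          | false => rfl
          | true => exact absurd hx hp
        have hstep : hunkStep (hunks, cur) l = (hunks, cur ++ [l]) := by
          simp only [hunkStep]
          rw [hsw]
          simp
        simp only [List.foldl_cons, hstep]
        rw [ih hunks (cur ++ [l]) (by simp)]
        rw [List.takeWhile_cons, List.dropWhile_cons, hb]
        simp

-- ===== VERDICT (by name: the statement is the Claim_ definition above) =====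
theorem split_into_hunks_spec : Claim_equal_split_into_hunks := by
  intro diff _
  unfold Spec_split_into_hunks split_into_hunks split_into_hunks_alt
  rw [hunkLoop_eq]
  cases hls : PySem.Str.splitlines diff with
  | nil => simp [grp]
  | cons l ls =>
      have hstep : hunkStep ([], []) l = ([], [l]) := by simp [hunkStep]
      simp only [List.foldl_cons, hstep]
      rw [foldl_hunkStep ls [] [l] (by simp)]
      simp [grp]
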